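-- pv_equiv track=rewrite | github.com/Buntworthy/Meals | datastore.py | search
-- ===== SOURCE A (Python) =====
-- def search(search_terms, index):
--     list_of_sets = []
--     for key in search_terms:
--         if key in index:
--             list_of_sets.append(set(index[key]))
--
--     if list_of_sets:
--         # Intersect all the sets
--         return set.intersection(*list_of_sets)
--     else:
--         return []
-- ===== SOURCE B (Python) =====
-- def search(search_terms, index):
--     # Counting algorithm: tally, per element, in how many present terms' posting
--     # sets it occurs; the intersection is exactly the elements whose tally equals
--     # the number of present terms. No set intersection is ever computed.
--     counts = {}
--     k = 0
--     for key in search_terms: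
--         if key in index:
--             k += 1
--             for x in dict.fromkeys(index[key]):  # deduplicated postings
--                 counts[x] = counts.get(x, 0) + 1
--     if k == 0:
--         return []
--     return {x for x, c in counts.items() if c == k}
-- ===== Notes on version B (the rewrite author's own statement) =====
-- stated objective: alternative
-- what changed: Replaces intersect-all-sets with a counting algorithm: one dict tallies, for each element, in how many present terms' (deduplicated) posting sets it occurs, and the result is the elements whose tally equals the number of present terms; no set intersection is computed.
import Mathlib
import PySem

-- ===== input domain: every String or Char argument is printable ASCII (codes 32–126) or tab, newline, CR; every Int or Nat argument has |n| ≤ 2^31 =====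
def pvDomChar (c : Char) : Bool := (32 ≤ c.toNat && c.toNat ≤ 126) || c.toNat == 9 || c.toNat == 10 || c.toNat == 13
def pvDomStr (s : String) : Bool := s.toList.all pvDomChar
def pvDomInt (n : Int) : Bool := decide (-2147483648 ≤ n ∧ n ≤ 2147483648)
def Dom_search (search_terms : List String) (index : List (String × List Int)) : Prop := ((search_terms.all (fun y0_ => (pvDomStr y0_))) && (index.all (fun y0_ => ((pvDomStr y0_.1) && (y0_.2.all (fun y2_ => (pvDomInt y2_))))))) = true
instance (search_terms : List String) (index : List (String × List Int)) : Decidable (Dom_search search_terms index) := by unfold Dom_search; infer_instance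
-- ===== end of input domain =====

-- B replaces A's intersect-all-sets with a counting algorithm: tally in how many
-- present terms' posting sets each element occurs and keep those whose tally equals
-- the number of present terms (objective: alternative).

-- ===== PORT A =====
def search (search_terms : List String) (index : List (String × List Int)) : List Int :=
  let d : PySem.Dict String (List Int) := PySem.Dict.mk index
  let list_of_sets : List (PySem.Set Int) :=
    search_terms.foldl
      (fun acc key =>
        if d.contains key then acc ++ [PySem.Set.ofList (d.getD key [])] else acc) []
  match list_of_sets with
  | [] => []
  | s :: rest => rest.foldl PySem.Set.inter s

-- ===== PORT B =====
def search_alt (search_terms : List String) (index : List (String × List Int)) : List Int :=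
  let d : PySem.Dict String (List Int) := PySem.Dict.mk index
  let st : PySem.Dict Int Int × Int :=
    search_terms.foldl
      (fun p key =>
        if d.contains key then
          ((PySem.Set.ofList (d.getD key [])).foldl
              (fun c x => c.insert x (c.getD x 0 + 1)) p.1,
           p.2 + 1)
        else p)
      (PySem.Dict.empty, 0)
  if st.2 == 0 then []
  else PySem.Set.ofList (((st.1.items).filter (fun xc => xc.2 == st.2)).map Prod.fst)

-- ===== PRECONDITION & SPEC =====
def Spec_search (search_terms : List String) (index : List (String × List Int)) (out : List Int) : Prop := out = search_alt search_terms index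
instance (search_terms : List String) (index : List (String × List Int)) (out : List Int) : Decidable (Spec_search search_terms index out) := by unfold Spec_search; infer_instance

-- ===== CLAIM (what is proved, stated in full; the proofs are below) =====
def Claim_equal_search : Prop := ∀ (search_terms : List String) (index : List (String × List Int)), Dom_search search_terms index → Spec_search search_terms index (search search_terms index)

-- ===== LEMMAS AND PROOFS =====

-- A guarded fold is a fold over the filtered list.
theorem pv_foldl_if_filter {α β : Type} (p : α → Bool) (f : β → α → β) :
    ∀ (l : List α) (init : β),
      l.foldl (fun acc x => if p x then f acc x else acc) init
        = (l.filter p).foldl f init := by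
  intro l
  induction l with
  | nil => intro init; rfl
  | cons x xs ih =>
    intro init
    by_cases h : p x = true <;> simp [h, ih]

-- Counting the iterations of a fold.
theorem pv_foldl_count (l : List String) :
    ∀ i : Int, l.foldl (fun (n : Int) _ => n + 1) i = i + l.length := by
  induction l with
  | nil => intro i; simp
  | cons x xs ih => intro i; simp [ih]; ring

-- A fold of inner folds over a list of lists is one fold over the concatenation.
theorem pv_foldl_flatMap {α β : Type} (f : β → α → β) :
    ∀ (ls : List (List α)) (init : β),
      ls.foldl (fun acc l => l.foldl f acc) init = (ls.flatMap id).foldl f init := by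
  intro ls
  induction ls with
  | nil => intro init; rfl
  | cons l ls ih => intro init; simp [List.flatMap_cons, List.foldl_append, ih]

-- Folding intersections is filtering by membership in every set.
theorem pv_foldl_inter (ss : List (PySem.Set Int)) :
    ∀ acc : List Int,
      ss.foldl PySem.Set.inter acc = acc.filter (fun x => ss.all (fun s => s.contains x)) := by
  induction ss with
  | nil => intro acc; simp
  | cons s ss ih =>
    intro acc
    simp only [List.foldl_cons, PySem.Set.inter, ih, List.filter_filter, List.all_cons]
    apply List.filter_congr
    intro x _
    simp [Bool.and_comm]

-- In a concatenation of duplicate-free lists, an element's multiplicity is bounded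
-- by the number of lists …
theorem pv_count_le (x : Int) :
    ∀ (ss : List (List Int)), (∀ s ∈ ss, s.Nodup) →
      (ss.flatMap id).count x ≤ ss.length := by
  intro ss
  induction ss with
  | nil => intro _; simp
  | cons s ts ih =>
    intro h
    have hs : s.count x ≤ 1 := List.nodup_iff_count_le_one.mp (h s (by simp)) x
    have ht := ih (fun u hu => h u (by simp [hu]))
    simp only [List.flatMap_cons, List.count_append, List.length_cons, id_def]
    omega

-- … and equals it iff the element occurs in every list.
theorem pv_count_flatMap (x : Int) :
    ∀ (ss : List (List Int)), (∀ s ∈ ss, s.Nodup) →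
      (((ss.flatMap id).count x = ss.length) ↔ ss.all (fun s => s.contains x) = true) := by
  intro ss
  induction ss with
  | nil => intro _; simp
  | cons s ss ih =>
    intro h
    have hs : s.Nodup := h s (by simp)
    have hrest : ∀ t ∈ ss, t.Nodup := fun t ht => h t (by simp [ht])
    have hcnt : s.count x ≤ 1 := List.nodup_iff_count_le_one.mp hs x
    have hbound := pv_count_le x ss hrest
    have hmain := ih hrest
    simp only [List.flatMap_cons, List.count_append, List.length_cons, List.all_cons,
      Bool.and_eq_true, id_def]
    constructor
    · intro he
      have h1 : s.count x = 1 := by omega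
      have h2 : (ss.flatMap id).count x = ss.length := by omega
      refine ⟨?_, hmain.mp h2⟩
      have : x ∈ s := by
        by_contra hx
        simp [List.count_eq_zero_of_not_mem hx] at h1
      simpa using this
    · rintro ⟨h1, h2⟩
      have hx : x ∈ s := by simpa using h1
      have : 1 ≤ s.count x := List.one_le_count_iff.mpr hx
      have := hmain.mpr h2
      omega

theorem search_eq_alt (search_terms : List String) (index : List (String × List Int)) :
    search search_terms index = search_alt search_terms index := by
  simp only [search, search_alt]
  set d : PySem.Dict String (List Int) := PySem.Dict.mk index with hd
  set pres : List String := search_terms.filter (fun k => d.contains k) with hpres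
  set sets : List (PySem.Set Int) := pres.map (fun k => PySem.Set.ofList (d.getD k [])) with hsets
  set L : List Int := sets.flatMap id with hL
  -- A's list_of_sets is `sets`
  have hA : search_terms.foldl
      (fun acc key => if d.contains key then acc ++ [PySem.Set.ofList (d.getD key [])] else acc)
      ([] : List (PySem.Set Int)) = sets := by
    rw [PySem.List.foldl_append_if]; simp [hsets, hpres]
  -- B's state fold: split the pair, remove the guard
  have hB : search_terms.foldl
      (fun (p : PySem.Dict Int Int × Int) key =>
        if d.contains key then
          ((PySem.Set.ofList (d.getD key [])).foldl
              (fun c x => c.insert x (c.getD x 0 + 1)) p.1, p.2 + 1)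
        else p)
      (PySem.Dict.empty, 0)
      = (PySem.Dict.counter L, (pres.length : Int)) := by
    have := pv_foldl_if_filter (fun key => d.contains key)
      (fun (p : PySem.Dict Int Int × Int) key =>
        ((PySem.Set.ofList (d.getD key [])).foldl
            (fun c x => c.insert x (c.getD x 0 + 1)) p.1, p.2 + 1))
      search_terms (PySem.Dict.empty, 0)
    rw [show (fun (p : PySem.Dict Int Int × Int) key =>
          if d.contains key then
            ((PySem.Set.ofList (d.getD key [])).foldl
                (fun c x => c.insert x (c.getD x 0 + 1)) p.1, p.2 + 1)
          else p)
        = (fun (p : PySem.Dict Int Int × Int) key =>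
            if (fun k => d.contains k) key then
              ((fun (p : PySem.Dict Int Int × Int) key =>
                ((PySem.Set.ofList (d.getD key [])).foldl
                    (fun c x => c.insert x (c.getD x 0 + 1)) p.1, p.2 + 1)) p key)
            else p) from rfl, this, ← hpres]
    rw [PySem.List.foldl_prod_mk
      (f := fun (c : PySem.Dict Int Int) key =>
        (PySem.Set.ofList (d.getD key [])).foldl (fun c x => c.insert x (c.getD x 0 + 1)) c)
      (g := fun (n : Int) _ => n + 1)]
    congr 1
    · -- the counter component
      have h1 : pres.foldl
          (fun (c : PySem.Dict Int Int) key =>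
            (PySem.Set.ofList (d.getD key [])).foldl (fun c x => c.insert x (c.getD x 0 + 1)) c)
          PySem.Dict.empty
          = sets.foldl
              (fun (c : PySem.Dict Int Int) s =>
                s.foldl (fun c x => c.insert x (c.getD x 0 + 1)) c) PySem.Dict.empty := by
        rw [hsets, List.foldl_map]
      rw [h1, pv_foldl_flatMap, ← hL,
        PySem.Dict.foldl_insert_getD_add_one_eq_counter]
    · simpa using pv_foldl_count pres 0
  rw [hA, hB]
  -- now case on sets
  have hnodup : ∀ s ∈ sets, List.Nodup s := by
    intro s hs
    rw [hsets] at hs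
    obtain ⟨k, _, rfl⟩ := List.mem_map.mp hs
    exact PySem.Set.nodup_ofList _
  cases hse : sets with
  | nil =>
    have : pres = [] := by
      by_contra h
      cases hp : pres with
      | nil => exact h hp
      | cons a l => rw [hsets, hp] at hse; simp at hse
    simp [this]
  | cons s0 rest =>
    have hlen : pres.length = sets.length := by rw [hsets]; simp
    have hne : ((pres.length : Int) == 0) = false := by
      rw [hlen, hse]
      simp only [List.length_cons, beq_eq_false_iff_ne, ne_eq]
      intro hc
      omega
    rw [hne]
    simp only [Bool.false_eq_true, if_false]
    -- B's item filter
    rw [PySem.Dict.items_counter]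
    have hfm : ((((PySem.Set.ofList L).map (fun k => (k, (L.count k : Int)))).filter
          (fun xc => xc.2 == (pres.length : Int))).map Prod.fst)
        = (PySem.Set.ofList L).filter (fun x => (L.count x : Int) == (pres.length : Int)) := by
      rw [List.filter_map, List.map_map]
      simp [Function.comp_def]
    rw [hfm]
    -- the count test is the all-membership test
    have hpredeq : ∀ x : Int,
        ((L.count x : Int) == (pres.length : Int)) = sets.all (fun s => s.contains x) := by
      intro x
      have hiff := pv_count_flatMap x sets hnodup
      by_cases h : (sets.flatMap id).count x = sets.length
      · have hx : ((List.count x L : Int) == (pres.length : Int)) = true := by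
          simp only [hL, hlen, beq_iff_eq]
          exact_mod_cast h
        rw [hx]
        exact (hiff.mp h).symm
      · have h2 : sets.all (fun s => s.contains x) ≠ true := fun hc => h (hiff.mpr hc)
        simp only [Bool.not_eq_true] at h2
        rw [h2]
        simp only [hL, beq_eq_false_iff_ne, ne_eq, hlen]
        intro hc
        exact h (by exact_mod_cast hc)
    have hfilter : (PySem.Set.ofList L).filter (fun x => (L.count x : Int) == (pres.length : Int))
        = (PySem.Set.ofList L).filter (fun x => sets.all (fun s => s.contains x)) :=
      List.filter_congr (fun x _ => hpredeq x)
    rw [hfilter]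
    -- Set.ofList L = s0 ++ (new elements), and only s0's part survives the filter
    have hs0nodup : s0.Nodup := hnodup s0 (by rw [hse]; simp)
    have hLsplit : PySem.Set.ofList L = s0 ++ (PySem.Set.ofList (rest.flatMap id)).filter
        (fun y => !(PySem.Set.contains s0 y)) := by
      rw [hL, hse, List.flatMap_cons, id_def, PySem.Set.ofList_append,
        PySem.Set.ofList_eq_self_of_nodup _ hs0nodup, PySem.Set.update_eq_append_filter]
    rw [hLsplit, List.filter_append, hse]
    have htail : ((PySem.Set.ofList (rest.flatMap id)).filter
          (fun y => !(PySem.Set.contains s0 y))).filter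
          (fun x => (s0 :: rest).all (fun s => s.contains x)) = [] := by
      rw [List.filter_filter, List.filter_eq_nil_iff]
      intro a _
      by_cases hc : PySem.Set.contains s0 a = true <;>
        simp [PySem.Set.contains_eq_listContains] at hc <;> simp [hc]
    rw [htail, List.append_nil]
    have hhead : s0.filter (fun x => (s0 :: rest).all (fun s => s.contains x))
        = s0.filter (fun x => rest.all (fun s => s.contains x)) := by
      apply List.filter_congr
      intro x hx
      simp only [List.all_cons]
      have hcx : PySem.Set.contains s0 x = true := by
        simp [PySem.Set.contains_eq_listContains, hx]
      simp only [hcx, Bool.true_and]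
    rw [hhead, pv_foldl_inter,
      PySem.Set.ofList_eq_self_of_nodup _ (List.Nodup.filter _ hs0nodup)]

-- ===== VERDICT (by name: the statement is the Claim_ definition above) =====
theorem search_spec : Claim_equal_search := by
  intro search_terms index _
  exact search_eq_alt search_terms index
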